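-- pv_equiv track=rewrite | github.com/dungprolhvn/PTIT-codes | dsa/DSA11023.py | treeLevel
-- ===== SOURCE A (Python) =====
-- def treeLevel(preOrder, start, end, level):
--     """
--     Return the level of the BST from preorder traversal
--     """
--     if start >= end:
--         return level
--     root = preOrder[start]
--     idx = -1
--     for i in range(start+1, end+1):
--         if root < preOrder[i]:
--             idx = i
--             break
--     if idx == -1:
--         return treeLevel(preOrder, start+1, end, level+1)
--     return max(treeLevel(preOrder, start+1, idx-1, level+1), treeLevel(preOrder, idx, end, level+1))
-- ===== SOURCE B (Python) =====
-- def treeLevel(preOrder, start, end, level):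
--     """
--     Return the level of the BST from preorder traversal.
--     Single pass: a recursion carrying an upper bound that returns
--     (subtree height in nodes, index just past the consumed segment),
--     so no per-node linear scan is needed.
--     """
--     if start >= end:
--         return level
--
--     def build(i, bound):
--         # consume the maximal segment starting at i whose elements do not
--         # exceed bound; return (height in nodes, first index not consumed)
--         if i > end:
--             return (0, i)
--         v = preOrder[i]
--         if bound is not None and bound < v:
--             return (0, i)
--         hl, j = build(i + 1, v)
--         hr, k = build(j, bound)
--         return (1 + max(hl, hr), k)
--
--     h, _ = build(start, None)
--     return level + h - 1
-- ===== Notes on version B (the rewrite author's own statement) =====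
-- stated objective: alternative
-- what changed: A rescans each range to find the first element greater than the root and recurses on the two halves; B reconstructs the height in a single left-to-right recursion that carries an upper bound and returns (height, stop index), visiting each element once.
-- outside the precondition, e.g. on treeLevel([5, -1, -3, 2], -3, 0, -2): A returns 1, B returns 0
import Mathlib
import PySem

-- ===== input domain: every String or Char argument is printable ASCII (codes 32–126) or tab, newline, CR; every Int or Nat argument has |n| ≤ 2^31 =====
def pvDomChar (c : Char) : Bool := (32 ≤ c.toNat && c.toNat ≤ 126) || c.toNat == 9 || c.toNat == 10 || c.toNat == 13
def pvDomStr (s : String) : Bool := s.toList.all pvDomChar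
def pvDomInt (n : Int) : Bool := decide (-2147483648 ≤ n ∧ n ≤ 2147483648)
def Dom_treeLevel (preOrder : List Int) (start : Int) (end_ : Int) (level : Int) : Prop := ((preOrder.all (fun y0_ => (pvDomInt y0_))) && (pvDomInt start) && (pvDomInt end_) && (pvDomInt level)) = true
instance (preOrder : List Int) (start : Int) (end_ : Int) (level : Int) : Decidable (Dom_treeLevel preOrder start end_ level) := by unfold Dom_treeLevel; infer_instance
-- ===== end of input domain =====

-- B replaces A's per-node scan-and-split range recursion by a single left-to-right
-- bounded recursion returning (height, stop index); objective: alternative algorithm.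

-- ===== PORT A =====
-- preOrder[i] (inside Pre_ every accessed index is in range; 0 stands for the raising case)
def pvGet (a : List Int) (i : Int) : Int := (PySem.List.pyGet? a i).getD 0

-- A's `for i in range(start+1, end+1): if root < preOrder[i]: idx = i; break` loop
-- (Nat fuel only makes the recursion structural; the wrapper supplies enough)
def pvScanF (a : List Int) (root : Int) : Nat → Int → Int → Int
  | 0, _, _ => -1
  | fuel + 1, i, e =>
    if i > e then -1
    else if root < pvGet a i then i
    else pvScanF a root fuel (i + 1) e

def pvScan (a : List Int) (root : Int) (i : Int) (e : Int) : Int :=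
  pvScanF a root (e + 1 - i).toNat i e

def treeLevelF (preOrder : List Int) : Nat → Int → Int → Int → Int
  | 0, _, _, level => level
  | fuel + 1, start, end_, level =>
    if start ≥ end_ then level
    else if pvScan preOrder (pvGet preOrder start) (start + 1) end_ = -1 then
      treeLevelF preOrder fuel (start + 1) end_ (level + 1)
    else
      max (treeLevelF preOrder fuel (start + 1) (pvScan preOrder (pvGet preOrder start) (start + 1) end_ - 1) (level + 1))
          (treeLevelF preOrder fuel (pvScan preOrder (pvGet preOrder start) (start + 1) end_) end_ (level + 1))

def treeLevel (preOrder : List Int) (start : Int) (end_ : Int) (level : Int) : Int :=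
  treeLevelF preOrder (end_ - start).toNat start end_ level

-- ===== PORT B =====
-- `bound is not None and bound < v`
def pvStops (b : Option Int) (v : Int) : Bool :=
  match b with
  | none => false
  | some bv => decide (bv < v)

-- B's inner `build`; the Nat fuel only makes the recursion structural (enough is supplied)
def pvBuild (a : List Int) (e : Int) : Nat → Int → Option Int → Int × Int
  | 0, i, _ => (0, i)
  | fuel + 1, i, b =>
    if i > e then (0, i)
    else if pvStops b (pvGet a i) then (0, i)
    else
      let p := pvBuild a e fuel (i + 1) (some (pvGet a i))
      let q := pvBuild a e fuel p.2 b
      (1 + max p.1 q.1, q.2)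

def treeLevel_alt (preOrder : List Int) (start : Int) (end_ : Int) (level : Int) : Int :=
  if start ≥ end_ then level
  else level + (pvBuild preOrder end_ ((end_ - start + 2).toNat) start none).1 - 1

-- ===== PRECONDITION & SPEC =====
-- Pre_ keeps the natural index-range domain: for start < end it requires 0 ≤ start and
-- end < len (beyond which A raises IndexError); negative start (Python wraparound, where
-- A's scan can return literal index -1 and conflate it with its -1 sentinel) is excluded
-- as malformed input for a range-based API.
def Pre_treeLevel (preOrder : List Int) (start : Int) (end_ : Int) (level : Int) : Prop :=
  start ≥ end_ ∨ (0 ≤ start ∧ end_ < (preOrder.length : Int))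
instance (preOrder : List Int) (start : Int) (end_ : Int) (level : Int) : Decidable (Pre_treeLevel preOrder start end_ level) := by unfold Pre_treeLevel; infer_instance

def pvWitness_treeLevel : List Int × Int × Int × Int := ([3, 1, 2, 5, 4], 0, 4, 0)

def Spec_treeLevel (preOrder : List Int) (start : Int) (end_ : Int) (level : Int) (out : Int) : Prop := out = treeLevel_alt preOrder start end_ level
instance (preOrder : List Int) (start : Int) (end_ : Int) (level : Int) (out : Int) : Decidable (Spec_treeLevel preOrder start end_ level out) := by unfold Spec_treeLevel; infer_instance

-- ===== CLAIM (what is proved, stated in full; the proofs are below) =====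
def Claim_equal_treeLevel : Prop := ∀ (preOrder : List Int) (start : Int) (end_ : Int) (level : Int), Dom_treeLevel preOrder start end_ level → Pre_treeLevel preOrder start end_ level → Spec_treeLevel preOrder start end_ level (treeLevel preOrder start end_ level)

-- ===== LEMMAS AND PROOFS =====

-- one unfolding step of the scan (the wrapper's fuel matches the step exactly)
theorem pvScan_unfold (a : List Int) (root i e : Int) :
    pvScan a root i e =
      if i > e then -1 else if root < pvGet a i then i else pvScan a root (i + 1) e := by
  unfold pvScan
  by_cases h : i > e
  · rw [if_pos h, (by omega : (e + 1 - i).toNat = 0)]; rfl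
  · rw [if_neg h, (by omega : (e + 1 - i).toNat = (e + 1 - (i + 1)).toNat + 1)]
    simp only [pvScanF]
    rw [if_neg h]

theorem pvScan_bounds_aux (a : List Int) (root : Int) :
    ∀ n : Nat, ∀ i e : Int, (e + 1 - i).toNat ≤ n →
      pvScan a root i e = -1 ∨ (i ≤ pvScan a root i e ∧ pvScan a root i e ≤ e) := by
  intro n
  induction n with
  | zero =>
      intro i e hn
      rw [pvScan_unfold, if_pos (by omega : i > e)]
      exact Or.inl rfl
  | succ n ih =>
      intro i e hn
      by_cases h : i > e
      · rw [pvScan_unfold, if_pos h]; exact Or.inl rfl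
      · rw [pvScan_unfold, if_neg h]
        by_cases h2 : root < pvGet a i
        · rw [if_pos h2]; right; omega
        · rw [if_neg h2]
          rcases ih (i + 1) e (by omega) with h3 | h3
          · exact Or.inl h3
          · right; omega

theorem pvScan_bounds (a : List Int) (root i e : Int) :
    pvScan a root i e = -1 ∨ (i ≤ pvScan a root i e ∧ pvScan a root i e ≤ e) :=
  pvScan_bounds_aux a root (e + 1 - i).toNat i e (le_refl _)

theorem treeLevelF_base (a : List Int) (f : Nat) (s e l : Int) (h : s ≥ e) :
    treeLevelF a f s e l = l := by
  cases f with
  | zero => rfl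
  | succ f => simp only [treeLevelF]; rw [if_pos h]

-- with enough fuel the fuel amount is irrelevant
theorem treeLevelF_congr (a : List Int) :
    ∀ f1 : Nat, ∀ (f2 : Nat) (s e l : Int), (e - s).toNat ≤ f1 → (e - s).toNat ≤ f2 →
      treeLevelF a f1 s e l = treeLevelF a f2 s e l := by
  intro f1
  induction f1 with
  | zero =>
      intro f2 s e l h1 h2
      rw [treeLevelF_base a 0 s e l (by omega), treeLevelF_base a f2 s e l (by omega)]
  | succ f ih =>
      intro f2 s e l h1 h2
      by_cases hs : s ≥ e
      · rw [treeLevelF_base a (f + 1) s e l hs, treeLevelF_base a f2 s e l hs]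
      · obtain ⟨f2', rfl⟩ : ∃ k, f2 = k + 1 := ⟨f2 - 1, by omega⟩
        simp only [treeLevelF]
        rw [if_neg hs, if_neg hs]
        by_cases h2 : pvScan a (pvGet a s) (s + 1) e = -1
        · rw [if_pos h2, if_pos h2]
          exact ih f2' (s + 1) e (l + 1) (by omega) (by omega)
        · rw [if_neg h2, if_neg h2]
          rcases pvScan_bounds a (pvGet a s) (s + 1) e with hb | hb
          · exact absurd hb h2
          · rw [ih f2' (s + 1) (pvScan a (pvGet a s) (s + 1) e - 1) (l + 1) (by omega) (by omega),
              ih f2' (pvScan a (pvGet a s) (s + 1) e) e (l + 1) (by omega) (by omega)]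

-- targeted unfolding equations for treeLevel
theorem treeLevel_base (a : List Int) (s e l : Int) (h : s ≥ e) : treeLevel a s e l = l :=
  treeLevelF_base a _ s e l h

theorem treeLevel_rec_none (a : List Int) (s e l : Int) (h1 : ¬ s ≥ e)
    (h2 : pvScan a (pvGet a s) (s + 1) e = -1) :
    treeLevel a s e l = treeLevel a (s + 1) e (l + 1) := by
  unfold treeLevel
  rw [(by omega : (e - s).toNat = (e - s).toNat - 1 + 1)]
  simp only [treeLevelF]
  rw [if_neg h1, if_pos h2]
  exact treeLevelF_congr a ((e - s).toNat - 1) ((e - (s + 1)).toNat) (s + 1) e (l + 1)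
    (by omega) (le_refl _)

theorem treeLevel_rec_found (a : List Int) (s e l : Int) (h1 : ¬ s ≥ e)
    (h2 : ¬ pvScan a (pvGet a s) (s + 1) e = -1) :
    treeLevel a s e l =
      max (treeLevel a (s + 1) (pvScan a (pvGet a s) (s + 1) e - 1) (l + 1))
          (treeLevel a (pvScan a (pvGet a s) (s + 1) e) e (l + 1)) := by
  unfold treeLevel
  rcases pvScan_bounds a (pvGet a s) (s + 1) e with hb | hb
  · exact absurd hb h2
  · rw [(by omega : (e - s).toNat = (e - s).toNat - 1 + 1)]
    simp only [treeLevelF]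
    rw [if_neg h1, if_neg h2,
      treeLevelF_congr a ((e - s).toNat - 1) ((pvScan a (pvGet a s) (s + 1) e - 1 - (s + 1)).toNat)
        (s + 1) (pvScan a (pvGet a s) (s + 1) e - 1) (l + 1) (by omega) (le_refl _),
      treeLevelF_congr a ((e - s).toNat - 1) ((e - pvScan a (pvGet a s) (s + 1) e).toNat)
        (pvScan a (pvGet a s) (s + 1) e) e (l + 1) (by omega) (le_refl _)]

-- pvScan characterisation (nonnegative scan start, so a found index is never -1)
theorem pvScan_spec (a : List Int) (root : Int) :
    ∀ n : Nat, ∀ i e : Int, (e + 1 - i).toNat ≤ n → 0 ≤ i →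
    (pvScan a root i e = -1 ∧ ∀ k, i ≤ k → k ≤ e → pvGet a k ≤ root)
    ∨ (i ≤ pvScan a root i e ∧ pvScan a root i e ≤ e ∧
        root < pvGet a (pvScan a root i e) ∧
        ∀ k, i ≤ k → k < pvScan a root i e → pvGet a k ≤ root) := by
  intro n
  induction n with
  | zero =>
      intro i e hn _
      rw [pvScan_unfold, if_pos (by omega : i > e)]
      exact Or.inl ⟨rfl, fun k hk1 hk2 => absurd (le_trans hk1 hk2) (by omega)⟩
  | succ n ih =>
      intro i e hn hi
      by_cases h : i > e
      · rw [pvScan_unfold, if_pos h]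
        exact Or.inl ⟨rfl, fun k hk1 hk2 => absurd (le_trans hk1 hk2) (by omega)⟩
      · rw [pvScan_unfold, if_neg h]
        by_cases h2 : root < pvGet a i
        · rw [if_pos h2]
          exact Or.inr ⟨le_refl _, by omega, h2,
            fun k hk1 hk2 => absurd (lt_of_le_of_lt hk1 hk2) (lt_irrefl _)⟩
        · rw [if_neg h2]
          rcases ih (i + 1) e (by omega) (by omega) with ⟨h3, h4⟩ | ⟨h3, h4, h5, h6⟩
          · refine Or.inl ⟨h3, fun k hk1 hk2 => ?_⟩
            rcases eq_or_lt_of_le hk1 with rfl | hk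
            · omega
            · exact h4 k (by omega) hk2
          · refine Or.inr ⟨by omega, h4, h5, fun k hk1 hk2 => ?_⟩
            rcases eq_or_lt_of_le hk1 with rfl | hk
            · omega
            · exact h6 k (by omega) hk2

-- the level argument is threaded additively through A
theorem treeLevel_shift (a : List Int) :
    ∀ n : Nat, ∀ s e l : Int, (e - s).toNat ≤ n →
      treeLevel a s e l = l + treeLevel a s e 0 := by
  intro n
  induction n with
  | zero =>
      intro s e l hn
      rw [treeLevel_base a s e l (by omega), treeLevel_base a s e 0 (by omega)]; omega
  | succ n ih =>
      intro s e l hn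
      by_cases h1 : s ≥ e
      · rw [treeLevel_base a s e l h1, treeLevel_base a s e 0 h1]; omega
      · by_cases h2 : pvScan a (pvGet a s) (s + 1) e = -1
        · rw [treeLevel_rec_none a s e l h1 h2, treeLevel_rec_none a s e 0 h1 h2,
            ih (s + 1) e (l + 1) (by omega), ih (s + 1) e (0 + 1) (by omega)]
          omega
        · have hb := pvScan_bounds a (pvGet a s) (s + 1) e
          rcases hb with hb | hb
          · exact absurd hb h2
          · rw [treeLevel_rec_found a s e l h1 h2, treeLevel_rec_found a s e 0 h1 h2,
              ih (s + 1) (pvScan a (pvGet a s) (s + 1) e - 1) (l + 1) (by omega),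
              ih (s + 1) (pvScan a (pvGet a s) (s + 1) e - 1) (0 + 1) (by omega),
              ih (pvScan a (pvGet a s) (s + 1) e) e (l + 1) (by omega),
              ih (pvScan a (pvGet a s) (s + 1) e) e (0 + 1) (by omega)]
            simp only [max_def]
            split_ifs <;> omega

theorem treeLevel_nonneg (a : List Int) :
    ∀ n : Nat, ∀ s e : Int, (e - s).toNat ≤ n → 0 ≤ treeLevel a s e 0 := by
  intro n
  induction n with
  | zero =>
      intro s e hn; rw [treeLevel_base a s e 0 (by omega)]
  | succ n ih =>
      intro s e hn
      by_cases h1 : s ≥ e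
      · rw [treeLevel_base a s e 0 h1]
      · by_cases h2 : pvScan a (pvGet a s) (s + 1) e = -1
        · rw [treeLevel_rec_none a s e 0 h1 h2,
            treeLevel_shift a n (s + 1) e (0 + 1) (by omega)]
          have := ih (s + 1) e (by omega); omega
        · have hb := pvScan_bounds a (pvGet a s) (s + 1) e
          rcases hb with hb | hb
          · exact absurd hb h2
          · rw [treeLevel_rec_found a s e 0 h1 h2,
              treeLevel_shift a n (pvScan a (pvGet a s) (s + 1) e) e (0 + 1) (by omega)]
            have := ih (pvScan a (pvGet a s) (s + 1) e) e (by omega)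
            simp only [max_def]
            split_ifs <;> omega

-- one unfolding step of pvBuild in the consuming case
theorem pvBuild_step (a : List Int) (e : Int) (n : Nat) (i : Int) (b : Option Int)
    (h1 : ¬ i > e) (h2 : pvStops b (pvGet a i) = false) :
    pvBuild a e (n + 1) i b =
      (1 + max (pvBuild a e n (i + 1) (some (pvGet a i))).1
               (pvBuild a e n (pvBuild a e n (i + 1) (some (pvGet a i))).2 b).1,
       (pvBuild a e n (pvBuild a e n (i + 1) (some (pvGet a i))).2 b).2) := by
  simp only [pvBuild]
  rw [if_neg h1, h2]
  simp

-- main invariant: on a maximal bounded segment [i, m], pvBuild returns A's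
-- node-height of that segment and the index just past it
theorem pvBuild_spec (a : List Int) (e : Int) :
    ∀ fuel : Nat, ∀ i m : Int, ∀ b : Option Int,
      (m + 1 - i).toNat < fuel → 0 ≤ i → i ≤ m + 1 → m ≤ e →
      (∀ k, i ≤ k → k ≤ m → pvStops b (pvGet a k) = false) →
      (m = e ∨ pvStops b (pvGet a (m + 1)) = true) →
      pvBuild a e fuel i b = ((if i ≤ m then 1 + treeLevel a i m 0 else 0), m + 1) := by
  intro fuel
  induction fuel with
  | zero => intro i m b hf; exact absurd hf (by omega)
  | succ n ih =>
      intro i m b hf hi0 him hme hin hstop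
      by_cases hempty : i = m + 1
      · subst hempty
        rcases hstop with rfl | hstop
        · simp only [pvBuild]
          rw [if_pos (by omega : m + 1 > m)]
          rw [if_neg (by omega : ¬ m + 1 ≤ m)]
        · simp only [pvBuild]
          by_cases hie : m + 1 > e
          · rw [if_pos hie, if_neg (by omega : ¬ m + 1 ≤ m)]
          · rw [if_neg hie, hstop]
            simp only [if_true]
            rw [if_neg (by omega : ¬ m + 1 ≤ m)]
      · have him' : i ≤ m := by omega
        have hcons := hin i (le_refl _) him'
        rw [pvBuild_step a e n i b (by omega) hcons]
        rcases pvScan_spec a (pvGet a i) (m + 1 - (i + 1)).toNat (i + 1) m (le_refl _) (by omega)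
          with ⟨hsc, hall⟩ | ⟨h1, h2, h3, h4⟩
        · -- no element of (i, m] exceeds preOrder[i]
          have hstop' : m = e ∨ pvStops (some (pvGet a i)) (pvGet a (m + 1)) = true := by
            rcases hstop with rfl | hstop
            · exact Or.inl rfl
            · right
              match b with
              | none => simp [pvStops] at hstop
              | some bv =>
                  simp only [pvStops, decide_eq_false_iff_not, not_lt] at hcons
                  simp only [pvStops, decide_eq_true_eq] at hstop ⊢
                  omega
          have e1 := ih (i + 1) m (some (pvGet a i)) (by omega) (by omega) (by omega) hme
            (by
              intro k hk1 hk2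
              simp only [pvStops, decide_eq_false_iff_not, not_lt]
              exact hall k hk1 hk2) hstop'
          rw [e1]
          have e2 := ih (m + 1) m b (by omega) (by omega) (by omega) hme
            (fun k hk1 hk2 => by omega) hstop
          simp only
          rw [e2]
          simp only
          rw [if_pos him']
          by_cases hsing : i + 1 ≤ m
          · -- i < m: A recurses on (i+1, m)
            rw [if_pos hsing,
              treeLevel_rec_none a i m 0 (by omega) hsc,
              treeLevel_shift a (m - (i + 1)).toNat (i + 1) m (0 + 1) (by omega)]
            have := treeLevel_nonneg a (m - (i + 1)).toNat (i + 1) m (by omega)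
            simp only [Prod.mk.injEq, max_def]
            constructor
            · split_ifs <;> omega
            · trivial
          · -- i = m: single element
            rw [if_neg hsing, treeLevel_base a i m 0 (by omega : i ≥ m)]
            simp only [Prod.mk.injEq, max_def]
            constructor
            · split_ifs <;> omega
            · trivial
        · -- first element exceeding preOrder[i] sits at idx ∈ (i, m]
          have e1 := ih (i + 1) (pvScan a (pvGet a i) (i + 1) m - 1) (some (pvGet a i))
            (by omega) (by omega) (by omega) (by omega)
            (by
              intro k hk1 hk2
              simp only [pvStops, decide_eq_false_iff_not, not_lt]
              exact h4 k hk1 (by omega))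
            (by
              right
              rw [(by omega : pvScan a (pvGet a i) (i + 1) m - 1 + 1 = pvScan a (pvGet a i) (i + 1) m)]
              simp only [pvStops, decide_eq_true_eq]
              exact h3)
          rw [e1]
          simp only
          rw [(by omega : pvScan a (pvGet a i) (i + 1) m - 1 + 1 = pvScan a (pvGet a i) (i + 1) m)]
          have e2 := ih (pvScan a (pvGet a i) (i + 1) m) m b (by omega) (by omega) (by omega) hme
            (fun k hk1 hk2 => hin k (by omega) hk2) hstop
          rw [e2]
          simp only
          rw [if_pos h2, if_pos him',
            treeLevel_rec_found a i m 0 (by omega) (by omega),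
            treeLevel_shift a (pvScan a (pvGet a i) (i + 1) m - 1 - (i + 1)).toNat (i + 1)
              (pvScan a (pvGet a i) (i + 1) m - 1) (0 + 1) (by omega),
            treeLevel_shift a (m - pvScan a (pvGet a i) (i + 1) m).toNat
              (pvScan a (pvGet a i) (i + 1) m) m (0 + 1) (by omega)]
          have hnn1 := treeLevel_nonneg a (m - pvScan a (pvGet a i) (i + 1) m).toNat
            (pvScan a (pvGet a i) (i + 1) m) m (by omega)
          by_cases hlft : i + 1 ≤ pvScan a (pvGet a i) (i + 1) m - 1
          · rw [if_pos hlft]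
            simp only [Prod.mk.injEq, max_def]
            constructor
            · split_ifs <;> omega
            · trivial
          · rw [if_neg hlft,
              treeLevel_base a (i + 1) (pvScan a (pvGet a i) (i + 1) m - 1) 0 (by omega)]
            simp only [Prod.mk.injEq, max_def]
            constructor
            · split_ifs <;> omega
            · trivial

-- ===== VERDICT (by name: the statement is the Claim_ definition above) =====
theorem treeLevel_spec : Claim_equal_treeLevel := by
  intro preOrder start end_ level _hDom hPre
  unfold Spec_treeLevel treeLevel_alt
  by_cases h1 : start ≥ end_
  · rw [if_pos h1, treeLevel_base preOrder start end_ level h1]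
  · rw [if_neg h1]
    rcases hPre with hPre | ⟨hs0, _⟩
    · exact absurd hPre h1
    · rw [pvBuild_spec preOrder end_ ((end_ - start + 2).toNat) start end_ none
        (by omega) hs0 (by omega) (le_refl _) (fun k _ _ => rfl) (Or.inl rfl)]
      simp only
      rw [if_pos (by omega : start ≤ end_),
        treeLevel_shift preOrder (end_ - start).toNat start end_ level (by omega)]
      omega
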